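-- pv_equiv track=rewrite | github.com/openwdl/wdl | scripts/wrappers/gatk/gatkToWdlWrapper.py | getWdlType
-- ===== SOURCE A (Python) =====
-- def getWdlType(jsonType):
--     if(jsonType.lower() == "double"):
--         return "Float"
--     elif(jsonType.lower() == "integer" or jsonType.lower() == "int"):
--         return "Int"
--     elif(jsonType.lower() == "boolean"):
--         return "Boolean"
--     elif(jsonType.lower() == "file"):
--         return "File"
--     elif("list" in jsonType.lower()):
--         substring = jsonType[jsonType.find("[")+1:len(jsonType)-1]
--         return "Array[" + getWdlType(substring) + "]"
--     else:
--         return "String"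
-- ===== SOURCE B (Python) =====
-- def getWdlType(jsonType):
--     # Iterative version: peel "list" wrappers counting depth, then resolve the base type.
--     current = jsonType
--     depth = 0
--     while "list" in current.lower():
--         current = current[current.find("[") + 1 : len(current) - 1]
--         depth += 1
--     low = current.lower()
--     if low == "double":
--         base = "Float"
--     elif low == "integer" or low == "int":
--         base = "Int"
--     elif low == "boolean":
--         base = "Boolean"
--     elif low == "file":
--         base = "File"
--     else:
--         base = "String"
--     return "Array[" * depth + base + "]" * depth
-- ===== Notes on version B (the rewrite author's own statement) =====
-- stated objective: alternative
-- what changed: Replaces A's recursion with an iterative loop that strips nested list wrappers while counting their depth, then resolves the innermost base type once and concatenates that many array prefixes and closing brackets around it.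
import Mathlib
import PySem

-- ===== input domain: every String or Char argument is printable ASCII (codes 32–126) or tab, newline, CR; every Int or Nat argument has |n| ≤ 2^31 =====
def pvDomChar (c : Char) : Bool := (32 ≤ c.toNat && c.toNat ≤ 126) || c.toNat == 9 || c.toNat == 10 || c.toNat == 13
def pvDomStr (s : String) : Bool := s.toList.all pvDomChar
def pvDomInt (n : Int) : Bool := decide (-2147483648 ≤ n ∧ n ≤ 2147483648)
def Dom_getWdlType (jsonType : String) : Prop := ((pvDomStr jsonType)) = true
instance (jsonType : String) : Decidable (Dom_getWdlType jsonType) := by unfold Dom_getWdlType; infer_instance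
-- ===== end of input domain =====

-- B replaces A's recursion by a loop: peel the "list" wrappers counting the depth, then
-- resolve the base type once and wrap with "Array["*depth … "]"*depth (objective: simpler decomposition).

-- ===== PORT A =====
-- shared slice helper: jsonType[jsonType.find("[")+1 : len(jsonType)-1] (the same formula appears in both sources)
def pvSub (cs : List Char) : List Char :=
  PySem.Chars.slice cs (some (PySem.Chars.find cs "[".toList + 1)) (some (PySem.Chars.len cs - 1))

theorem pvSub_len_lt (cs : List Char) (h : 0 < cs.length) : (pvSub cs).length < cs.length := by
  simp only [pvSub, PySem.Chars.slice_eq_listSlice, PySem.List.length_slice, PySem.Chars.len]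
  have h1 : PySem.List.clampIdx cs.length ((cs.length : Int) - 1) ≤ cs.length - 1 := by
    have : ((cs.length : Int) - 1) = ((cs.length - 1 : Nat) : Int) := by omega
    rw [this, PySem.List.clampIdx_natCast]; omega
  omega

theorem pvSub_lt_of_isIn (cs : List Char)
    (h : PySem.Chars.isIn "list".toList (PySem.Chars.lower cs) = true) :
    (pvSub cs).length < cs.length := by
  apply pvSub_len_lt
  have hinf := (PySem.Chars.isIn_iff_infix _ _).mp h
  have hlen : "list".toList.length ≤ (PySem.Chars.lower cs).length := hinf.length_le
  have : (PySem.Chars.lower cs).length = cs.length := by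
    simp [PySem.Chars.lower]
  simp [this] at hlen
  omega

-- literal transliteration of A's recursion
def goA (cs : List Char) : List Char :=
  if PySem.Chars.lower cs = "double".toList then "Float".toList
  else if PySem.Chars.lower cs = "integer".toList ∨ PySem.Chars.lower cs = "int".toList then "Int".toList
  else if PySem.Chars.lower cs = "boolean".toList then "Boolean".toList
  else if PySem.Chars.lower cs = "file".toList then "File".toList
  else if h : PySem.Chars.isIn "list".toList (PySem.Chars.lower cs) then
    "Array[".toList ++ goA (pvSub cs) ++ "]".toList
  else "String".toList
termination_by cs.length
decreasing_by exact pvSub_lt_of_isIn cs h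

def getWdlType (jsonType : String) : String := String.ofList (goA jsonType.toList)

-- ===== PORT B =====
-- the while loop: peel "list" wrappers, counting depth
def peelB (cs : List Char) (depth : Nat) : Nat × List Char :=
  if h : PySem.Chars.isIn "list".toList (PySem.Chars.lower cs) then
    peelB (pvSub cs) (depth + 1)
  else (depth, cs)
termination_by cs.length
decreasing_by exact pvSub_lt_of_isIn cs h

-- the base-type priority chain, applied once after the loop
def baseB (cs : List Char) : List Char :=
  let low := PySem.Chars.lower cs
  if low = "double".toList then "Float".toList
  else if low = "integer".toList ∨ low = "int".toList then "Int".toList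
  else if low = "boolean".toList then "Boolean".toList
  else if low = "file".toList then "File".toList
  else "String".toList

def getWdlType_alt (jsonType : String) : String :=
  let p := peelB jsonType.toList 0
  String.ofList ((List.replicate p.1 "Array[".toList).flatten ++ baseB p.2
              ++ (List.replicate p.1 "]".toList).flatten)

-- ===== PRECONDITION & SPEC =====
def Spec_getWdlType (jsonType : String) (out : String) : Prop := out = getWdlType_alt jsonType
instance (jsonType : String) (out : String) : Decidable (Spec_getWdlType jsonType out) := by unfold Spec_getWdlType; infer_instance

-- ===== CLAIM (what is proved, stated in full; the proofs are below) =====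
def Claim_equal_getWdlType : Prop := ∀ (jsonType : String), Dom_getWdlType jsonType → Spec_getWdlType jsonType (getWdlType jsonType)

-- ===== LEMMAS AND PROOFS =====

theorem flatten_replicate_succ' {α : Type} (n : Nat) (xs : List α) :
    (List.replicate (n + 1) xs).flatten = (List.replicate n xs).flatten ++ xs := by
  rw [List.replicate_succ', List.flatten_append]; simp

theorem peelB_shift_aux (n : Nat) : ∀ cs : List Char, cs.length < n → ∀ d : Nat,
    peelB cs d = ((peelB cs 0).1 + d, (peelB cs 0).2) := by
  induction n with
  | zero => intro cs h; omega
  | succ n ih =>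
      intro cs hlen d
      by_cases h : PySem.Chars.isIn "list".toList (PySem.Chars.lower cs) = true
      · have hlt := pvSub_lt_of_isIn cs h
        conv_lhs => rw [peelB]
        conv_rhs => rw [peelB]
        rw [dif_pos h, dif_pos h,
            ih (pvSub cs) (by omega) (d + 1), ih (pvSub cs) (by omega) (0 + 1)]
        simp only [Prod.mk.injEq, and_true]
        omega
      · conv_lhs => rw [peelB]
        conv_rhs => rw [peelB]
        rw [dif_neg h, dif_neg h]
        simp

theorem goA_eq_peel_aux (n : Nat) : ∀ cs : List Char, cs.length < n →
    goA cs = (List.replicate (peelB cs 0).1 "Array[".toList).flatten ++ baseB (peelB cs 0).2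
              ++ (List.replicate (peelB cs 0).1 "]".toList).flatten := by
  induction n with
  | zero => intro cs h; omega
  | succ n ih =>
      intro cs hlen
      by_cases h : PySem.Chars.isIn "list".toList (PySem.Chars.lower cs) = true
      · have hlt := pvSub_lt_of_isIn cs h
        have hA : goA cs = "Array[".toList ++ goA (pvSub cs) ++ "]".toList := by
          rw [goA]
          have h1 : PySem.Chars.lower cs ≠ "double".toList := by
            intro e; rw [e] at h; exact absurd h (by decide)
          have h2 : ¬ (PySem.Chars.lower cs = "integer".toList ∨ PySem.Chars.lower cs = "int".toList) := by
            rintro (e | e) <;> rw [e] at h <;> exact absurd h (by decide)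
          have h3 : PySem.Chars.lower cs ≠ "boolean".toList := by
            intro e; rw [e] at h; exact absurd h (by decide)
          have h4 : PySem.Chars.lower cs ≠ "file".toList := by
            intro e; rw [e] at h; exact absurd h (by decide)
          rw [if_neg h1, if_neg h2, if_neg h3, if_neg h4, dif_pos h]
        have hB : peelB cs 0 = ((peelB (pvSub cs) 0).1 + 1, (peelB (pvSub cs) 0).2) := by
          conv_lhs => rw [peelB]
          rw [dif_pos h, peelB_shift_aux n (pvSub cs) (by omega) (0 + 1)]
        rw [hA, ih (pvSub cs) (by omega), hB]
        rw [List.replicate_succ, flatten_replicate_succ']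
        simp [List.append_assoc]
      · have hP : peelB cs 0 = (0, cs) := by rw [peelB, dif_neg h]
        rw [hP]
        simp only [List.replicate, List.flatten_nil, List.nil_append, List.append_nil]
        rw [goA]
        simp only [baseB]
        split_ifs with h1 h2 h3 h4 <;> rfl

-- ===== VERDICT (by name: the statement is the Claim_ definition above) =====
theorem getWdlType_spec : Claim_equal_getWdlType := by
  intro jsonType _
  unfold Spec_getWdlType getWdlType getWdlType_alt
  exact congrArg String.ofList (goA_eq_peel_aux (jsonType.toList.length + 1) jsonType.toList (by omega))
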